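-- pv_equiv track=rewrite | github.com/6201801127/odoo | tendrils/kw_inventory/models/add_product_items.py | generate_next_code
-- ===== SOURCE A (Python) =====
-- def generate_next_code(last_code):
--     code_options = []
--
--     for i in range(100):
--         code_options.append(f'{i:02d}')
--
--     for i in range(10):
--         for j in range(26):
--             code_options.append(f'{i}{chr(ord("A") + j)}')
--
--     for i in range(26):
--         for j in range(26):
--             code_options.append(f'{chr(ord("A") + i)}{chr(ord("A") + j)}')
--
--     for i in range(26):
--         for j in range(10):
--             code_options.append(f'{chr(ord("A") + i)}{j}')
--
--     if last_code not in code_options: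
--         return '00'  # Return '00' if last_code is not in code_options
--
--     last_code_index = code_options.index(last_code)
--     next_code_index = (last_code_index + 1) % len(code_options)
--
--     next_code = code_options[next_code_index]
--     return next_code
-- ===== SOURCE B (Python) =====
-- def generate_next_code(last_code):
--     idx = _code_index(last_code)
--     if idx is None:
--         return '00'
--     return _code_at((idx + 1) % 1296)
--
--
-- def _code_index(code):
--     # Index of a code in the fixed sequence 00..99, 0A..9Z, AA..ZZ, A0..Z9; None if invalid.
--     if len(code) != 2:
--         return None
--     x, y = ord(code[0]), ord(code[1])
--     if 48 <= x <= 57 and 48 <= y <= 57: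
--         return (x - 48) * 10 + (y - 48)
--     if 48 <= x <= 57 and 65 <= y <= 90:
--         return 100 + (x - 48) * 26 + (y - 65)
--     if 65 <= x <= 90 and 65 <= y <= 90:
--         return 360 + (x - 65) * 26 + (y - 65)
--     if 65 <= x <= 90 and 48 <= y <= 57:
--         return 1036 + (x - 65) * 10 + (y - 48)
--     return None
--
--
-- def _code_at(k):
--     if k < 100:
--         return chr(48 + k // 10) + chr(48 + k % 10)
--     if k < 360:
--         return chr(48 + (k - 100) // 26) + chr(65 + (k - 100) % 26)
--     if k < 1036:
--         return chr(65 + (k - 360) // 26) + chr(65 + (k - 360) % 26)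
--     return chr(65 + (k - 1036) // 10) + chr(48 + (k - 1036) % 10)
-- ===== Notes on version B (the rewrite author's own statement) =====
-- stated objective: faster
-- what changed: Instead of materialising the 1296-element code list and scanning it twice (membership + .index), B classifies the 2-char code by block arithmetic on character codes to get its index directly and converts (index+1) mod 1296 back to a code by the inverse arithmetic.
import Mathlib
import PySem

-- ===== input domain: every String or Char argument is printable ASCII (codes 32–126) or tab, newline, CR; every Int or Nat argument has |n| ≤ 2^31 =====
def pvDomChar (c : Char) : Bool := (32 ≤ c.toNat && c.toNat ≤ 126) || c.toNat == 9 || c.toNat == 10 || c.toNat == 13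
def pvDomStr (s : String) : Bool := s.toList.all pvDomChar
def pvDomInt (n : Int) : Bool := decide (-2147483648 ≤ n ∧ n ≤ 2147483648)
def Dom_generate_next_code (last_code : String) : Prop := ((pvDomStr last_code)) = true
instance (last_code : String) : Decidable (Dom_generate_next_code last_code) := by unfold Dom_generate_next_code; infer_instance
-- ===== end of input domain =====

-- B replaces A's build of the 1296-element code list plus two linear scans by direct block
-- arithmetic on the two character codes (classify the code, index arithmetically, decode (index+1) mod 1296).

-- ===== PORT A =====
-- f'{i:02d}' : exact for the values used here (0 ≤ i ≤ 99): zero-pad str(i) to width 2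
def pvFmt02d (i : Int) : String :=
  if i < 10 then "0" ++ PySem.Int.toStr i else PySem.Int.toStr i

-- the four append loops building code_options, step for step
def pvCodeOptions : List String :=
  let co := (PySem.List.pyRange 0 100 1).foldl (fun acc i => acc ++ [pvFmt02d i]) []
  let co := (PySem.List.pyRange 0 10 1).foldl (fun acc i =>
      (PySem.List.pyRange 0 26 1).foldl (fun acc j =>
        acc ++ [PySem.Int.toStr i ++ String.singleton (Char.ofNat (65 + j).toNat)]) acc) co
  let co := (PySem.List.pyRange 0 26 1).foldl (fun acc i =>
      (PySem.List.pyRange 0 26 1).foldl (fun acc j =>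
        acc ++ [String.singleton (Char.ofNat (65 + i).toNat) ++ String.singleton (Char.ofNat (65 + j).toNat)]) acc) co
  let co := (PySem.List.pyRange 0 26 1).foldl (fun acc i =>
      (PySem.List.pyRange 0 10 1).foldl (fun acc j =>
        acc ++ [String.singleton (Char.ofNat (65 + i).toNat) ++ PySem.Int.toStr j]) acc) co
  co

def generate_next_code (last_code : String) : String :=
  let code_options := pvCodeOptions
  if last_code ∉ code_options then "00"
  else
    match PySem.List.index? code_options last_code with
    | none => "00"  -- unreachable: membership was checked just above (Python .index would raise)
    | some last_code_index =>
      let next_code_index := PySem.Int.mod ((last_code_index : Int) + 1) (code_options.length : Int)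
      match PySem.List.pyGet? code_options next_code_index with
      | none => "00"  -- unreachable: next_code_index is in range
      | some next_code => next_code

-- ===== PORT B =====
def pvCodeIndex (code : String) : Option Nat :=
  match code.toList with
  | [a, b] =>
    let x := a.toNat
    let y := b.toNat
    if 48 ≤ x ∧ x ≤ 57 ∧ 48 ≤ y ∧ y ≤ 57 then some ((x - 48) * 10 + (y - 48))
    else if 48 ≤ x ∧ x ≤ 57 ∧ 65 ≤ y ∧ y ≤ 90 then some (100 + (x - 48) * 26 + (y - 65))
    else if 65 ≤ x ∧ x ≤ 90 ∧ 65 ≤ y ∧ y ≤ 90 then some (360 + (x - 65) * 26 + (y - 65))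
    else if 65 ≤ x ∧ x ≤ 90 ∧ 48 ≤ y ∧ y ≤ 57 then some (1036 + (x - 65) * 10 + (y - 48))
    else none
  | _ => none

def pvCodeAt (k : Nat) : String :=
  if k < 100 then String.ofList [Char.ofNat (48 + k / 10), Char.ofNat (48 + k % 10)]
  else if k < 360 then
    String.ofList [Char.ofNat (48 + (k - 100) / 26), Char.ofNat (65 + (k - 100) % 26)]
  else if k < 1036 then
    String.ofList [Char.ofNat (65 + (k - 360) / 26), Char.ofNat (65 + (k - 360) % 26)]
  else
    String.ofList [Char.ofNat (65 + (k - 1036) / 10), Char.ofNat (48 + (k - 1036) % 10)]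

def generate_next_code_alt (last_code : String) : String :=
  match pvCodeIndex last_code with
  | none => "00"
  | some idx => pvCodeAt ((idx + 1) % 1296)

-- ===== PRECONDITION & SPEC =====
def Spec_generate_next_code (last_code : String) (out : String) : Prop := out = generate_next_code_alt last_code
instance (last_code : String) (out : String) : Decidable (Spec_generate_next_code last_code out) := by unfold Spec_generate_next_code; infer_instance

-- ===== CLAIM (what is proved, stated in full; the proofs are below) =====
def Claim_equal_generate_next_code : Prop := ∀ (last_code : String), Dom_generate_next_code last_code → Spec_generate_next_code last_code (generate_next_code last_code)

-- ===== LEMMAS AND PROOFS =====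
set_option maxRecDepth 100000
set_option maxHeartbeats 1000000

-- A's append loops as one flat concatenation of maps
theorem pvCodeOptions_flat :
    pvCodeOptions =
      ((PySem.List.pyRange 0 100 1).map pvFmt02d)
      ++ (PySem.List.pyRange 0 10 1).flatMap (fun i => (PySem.List.pyRange 0 26 1).map (fun j => PySem.Int.toStr i ++ String.singleton (Char.ofNat (65 + j).toNat)))
      ++ (PySem.List.pyRange 0 26 1).flatMap (fun i => (PySem.List.pyRange 0 26 1).map (fun j => String.singleton (Char.ofNat (65 + i).toNat) ++ String.singleton (Char.ofNat (65 + j).toNat)))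
      ++ (PySem.List.pyRange 0 26 1).flatMap (fun i => (PySem.List.pyRange 0 10 1).map (fun j => String.singleton (Char.ofNat (65 + i).toNat) ++ PySem.Int.toStr j)) := by
  unfold pvCodeOptions
  simp only [PySem.List.foldl_append_singleton_eq_map, PySem.List.foldl_append_eq_flatMap, List.append_assoc, List.nil_append]

-- A's list is exactly [pvCodeAt 0, …, pvCodeAt 1295]
theorem pvCodeOptions_eq : pvCodeOptions = (List.range 1296).map pvCodeAt := by
  rw [pvCodeOptions_flat]; decide

-- B's classifier inverts B's decoder on all 1296 indices
theorem pvRoundtrip : ∀ k ∈ List.range 1296, pvCodeIndex (pvCodeAt k) = some k := by decide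

theorem pvCodeIndex_valid (s : String) (k : Nat) (h : pvCodeIndex s = some k) :
    k < 1296 ∧ pvCodeAt k = s := by
  unfold pvCodeIndex at h
  cases hs : s.toList with
  | nil => rw [hs] at h; exact absurd h (by simp)
  | cons a t =>
    cases t with
    | nil => rw [hs] at h; exact absurd h (by simp)
    | cons b t2 =>
      cases t2 with
      | cons c t3 => rw [hs] at h; exact absurd h (by simp)
      | nil =>
        rw [hs] at h
        simp only at h
        have hsmk : String.ofList [a, b] = s := by
          have := congrArg String.ofList hs
          simpa using this.symm
        split_ifs at h with h1 h2 h3 h4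
        · obtain ⟨hx1, hx2, hy1, hy2⟩ := h1
          have hk := (Option.some_inj.mp h).symm
          subst hk
          refine ⟨by omega, ?_⟩
          rw [pvCodeAt]
          rw [if_pos (by omega)]
          rw [← hsmk]
          have e1 : 48 + ((a.toNat - 48) * 10 + (b.toNat - 48)) / 10 = a.toNat := by omega
          have e2 : 48 + ((a.toNat - 48) * 10 + (b.toNat - 48)) % 10 = b.toNat := by omega
          rw [e1, e2, Char.ofNat_toNat, Char.ofNat_toNat]
        · obtain ⟨hx1, hx2, hy1, hy2⟩ := h2
          have hk := (Option.some_inj.mp h).symm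
          subst hk
          refine ⟨by omega, ?_⟩
          rw [pvCodeAt]
          rw [if_neg (by omega), if_pos (by omega)]
          rw [← hsmk]
          have e1 : 48 + (100 + (a.toNat - 48) * 26 + (b.toNat - 65) - 100) / 26 = a.toNat := by omega
          have e2 : 65 + (100 + (a.toNat - 48) * 26 + (b.toNat - 65) - 100) % 26 = b.toNat := by omega
          rw [e1, e2, Char.ofNat_toNat, Char.ofNat_toNat]
        · obtain ⟨hx1, hx2, hy1, hy2⟩ := h3
          have hk := (Option.some_inj.mp h).symm
          subst hk
          refine ⟨by omega, ?_⟩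
          rw [pvCodeAt]
          rw [if_neg (by omega), if_neg (by omega), if_pos (by omega)]
          rw [← hsmk]
          have e1 : 65 + (360 + (a.toNat - 65) * 26 + (b.toNat - 65) - 360) / 26 = a.toNat := by omega
          have e2 : 65 + (360 + (a.toNat - 65) * 26 + (b.toNat - 65) - 360) % 26 = b.toNat := by omega
          rw [e1, e2, Char.ofNat_toNat, Char.ofNat_toNat]
        · obtain ⟨hx1, hx2, hy1, hy2⟩ := h4
          have hk := (Option.some_inj.mp h).symm
          subst hk
          refine ⟨by omega, ?_⟩
          rw [pvCodeAt]
          rw [if_neg (by omega), if_neg (by omega), if_neg (by omega)]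
          rw [← hsmk]
          have e1 : 65 + (1036 + (a.toNat - 65) * 10 + (b.toNat - 48) - 1036) / 10 = a.toNat := by omega
          have e2 : 48 + (1036 + (a.toNat - 65) * 10 + (b.toNat - 48) - 1036) % 10 = b.toNat := by omega
          rw [e1, e2, Char.ofNat_toNat, Char.ofNat_toNat]

theorem pvCodeAt_inj (i j : Nat) (hi : i < 1296) (hj : j < 1296) (h : pvCodeAt i = pvCodeAt j) : i = j := by
  have h1 := pvRoundtrip i (List.mem_range.mpr hi)
  have h2 := pvRoundtrip j (List.mem_range.mpr hj)
  rw [h] at h1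
  rw [h1] at h2
  exact Option.some_inj.mp h2

theorem pvIndex_of_range_map (f : Nat → String) (n k : Nat) (hk : k < n)
    (hinj : ∀ i j, i < n → j < n → f i = f j → i = j) :
    PySem.List.index? ((List.range n).map f) (f k) = some k := by
  rw [PySem.List.index?_eq_some_iff]
  refine ⟨(List.range k).map f, (List.range (n - k - 1)).map (fun j => f (k + 1 + j)), ?_, by simp, ?_⟩
  · have hr : List.range n = List.range k ++ k :: (List.range (n - k - 1)).map (fun j => k + 1 + j) := by
      rw [show n = k + (1 + (n - k - 1)) by omega, List.range_add, List.range_add]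
      simp [List.map_map, Function.comp_def]
      omega
    rw [hr]
    simp [List.map_map, Function.comp_def]
  · intro hmem
    obtain ⟨j, hj, hfj⟩ := List.mem_map.mp hmem
    have hjk := List.mem_range.mp hj
    have := hinj j k (by omega) hk hfj
    omega

theorem pvLen : pvCodeOptions.length = 1296 := by
  rw [pvCodeOptions_eq]; simp


-- ===== VERDICT (by name: the statement is the Claim_ definition above) =====
theorem generate_next_code_spec : Claim_equal_generate_next_code := by
  unfold Claim_equal_generate_next_code
  intro s _hdom
  unfold Spec_generate_next_code generate_next_code generate_next_code_alt
  cases h : pvCodeIndex s with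
  | none =>
    have hnm : s ∉ pvCodeOptions := by
      intro hmem
      rw [pvCodeOptions_eq] at hmem
      obtain ⟨k, hk, hfk⟩ := List.mem_map.mp hmem
      have := pvRoundtrip k hk
      rw [hfk, h] at this
      exact absurd this (by simp)
    simp [hnm]
  | some k =>
    obtain ⟨hk, hs⟩ := pvCodeIndex_valid s k h
    have hmem : s ∈ pvCodeOptions := by
      rw [pvCodeOptions_eq, ← hs]
      exact List.mem_map_of_mem (List.mem_range.mpr hk)
    rw [if_neg (by simpa using hmem)]
    have hidx : PySem.List.index? pvCodeOptions s = some k := by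
      rw [pvCodeOptions_eq, ← hs]
      exact pvIndex_of_range_map pvCodeAt 1296 k hk pvCodeAt_inj
    rw [hidx]
    simp only
    have hmod : PySem.Int.mod ((k : Int) + 1) ((pvCodeOptions.length : Nat) : Int) = (((k + 1) % 1296 : Nat) : Int) := by
      rw [pvLen]
      have hc : ((k : Int) + 1) = (((k + 1 : Nat)) : Int) := by push_cast; ring
      rw [hc]
      exact PySem.Int.mod_natCast _ _
    rw [hmod]
    have hget : PySem.List.pyGet? pvCodeOptions (((k + 1) % 1296 : Nat) : Int) = some (pvCodeAt ((k + 1) % 1296)) := by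
      rw [PySem.List.pyGet?_natCast, pvCodeOptions_eq]
      rw [List.getElem?_map]
      rw [List.getElem?_range (Nat.mod_lt _ (by norm_num))]
      rfl
    rw [hget]
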